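-- pv_equiv track=rewrite | github.com/Maks6666/bcs_ai | src/status_counter.py | count_statuses
-- ===== SOURCE A (Python) =====
-- def count_statuses(statuses: dict):
--     moving_forward = 0
--     from_left_flank = 0
--     from_right_flank = 0
--     moving_back = 0
--
--     if len(statuses) != 0:
--         for key, _ in statuses.items():
--
--             if statuses[key] == "moving_back":
--                 moving_back += 1
--             elif statuses[key] == "from_left_flank":
--                 from_left_flank += 1
--             elif statuses[key] == "from_right_flank":
--                 from_right_flank += 1
--             elif statuses[key] == "center_flank":
--                 moving_forward += 1
--
--     text = f"Moves back: {moving_back} | Moves from left flank: {from_left_flank} | Moves from right flank: {from_right_flank} | Moves from central flank: {moving_forward}"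
--     return text, (moving_forward, from_left_flank, from_right_flank, moving_back)
-- ===== SOURCE B (Python) =====
-- def count_statuses(statuses: dict):
--     # staged passes: materialise the values once, then count each category
--     # with a dedicated list.count pass (no branching loop, no counters maintained)
--     vals = list(statuses.values())
--     moving_back = vals.count("moving_back")
--     from_left_flank = vals.count("from_left_flank")
--     from_right_flank = vals.count("from_right_flank")
--     moving_forward = vals.count("center_flank")
--     text = f"Moves back: {moving_back} | Moves from left flank: {from_left_flank} | Moves from right flank: {from_right_flank} | Moves from central flank: {moving_forward}"
--     return text, (moving_forward, from_left_flank, from_right_flank, moving_back)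
-- ===== Notes on version B (the rewrite author's own statement) =====
-- stated objective: simpler
-- what changed: Replaces A's single pass with four maintained counters and an if/elif chain (plus a per-item dict re-lookup) by four independent list.count passes over the values list, eliminating the branching loop and all loop state.
import Mathlib
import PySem

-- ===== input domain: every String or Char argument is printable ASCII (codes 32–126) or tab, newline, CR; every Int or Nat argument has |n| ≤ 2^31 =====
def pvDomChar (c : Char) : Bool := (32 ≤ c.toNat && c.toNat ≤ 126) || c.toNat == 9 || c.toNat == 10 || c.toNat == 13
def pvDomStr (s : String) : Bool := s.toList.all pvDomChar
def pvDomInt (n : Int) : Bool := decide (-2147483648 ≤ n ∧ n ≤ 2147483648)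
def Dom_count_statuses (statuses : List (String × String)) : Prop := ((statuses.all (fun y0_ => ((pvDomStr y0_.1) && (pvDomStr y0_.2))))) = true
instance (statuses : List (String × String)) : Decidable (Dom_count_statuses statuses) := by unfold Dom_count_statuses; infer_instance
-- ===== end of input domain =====

-- B replaces A's stateful if/elif counting loop by four independent list.count passes over
-- the values list (simpler; same O(n) cost).

-- shared f-string formatting (identical text in both Pythons)
def pvText_count_statuses (mb lf rf mf : Int) : String :=
  "Moves back: " ++ PySem.Int.toStr mb ++ " | Moves from left flank: " ++ PySem.Int.toStr lf ++
  " | Moves from right flank: " ++ PySem.Int.toStr rf ++ " | Moves from central flank: " ++ PySem.Int.toStr mf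

-- ===== PORT A =====
def count_statuses (statuses : List (String × String)) : String × (Int × Int × Int × Int) :=
  let d := PySem.Dict.mk statuses
  let st : Int × Int × Int × Int :=
    if statuses.length ≠ 0 then
      statuses.foldl (fun (s : Int × Int × Int × Int) kv =>
        let v := (d.get? kv.1).getD ""   -- statuses[key]; key comes from items so always present
        if v = "moving_back" then (s.1, s.2.1, s.2.2.1, s.2.2.2 + 1)
        else if v = "from_left_flank" then (s.1, s.2.1 + 1, s.2.2.1, s.2.2.2)
        else if v = "from_right_flank" then (s.1, s.2.1, s.2.2.1 + 1, s.2.2.2)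
        else if v = "center_flank" then (s.1 + 1, s.2.1, s.2.2.1, s.2.2.2)
        else s) (0, 0, 0, 0)
    else (0, 0, 0, 0)
  (pvText_count_statuses st.2.2.2 st.2.1 st.2.2.1 st.1, st)

-- ===== PORT B =====
def count_statuses_alt (statuses : List (String × String)) : String × (Int × Int × Int × Int) :=
  let vals := statuses.map Prod.snd
  let mb : Int := PySem.List.count vals "moving_back"
  let lf : Int := PySem.List.count vals "from_left_flank"
  let rf : Int := PySem.List.count vals "from_right_flank"
  let mf : Int := PySem.List.count vals "center_flank"
  (pvText_count_statuses mb lf rf mf, (mf, lf, rf, mb))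

-- ===== PRECONDITION & SPEC =====
-- Pre_ excludes association lists with duplicate keys: a Python dict can never contain them,
-- so such lists correspond to no actual input of A.
def Pre_count_statuses (statuses : List (String × String)) : Prop :=
  (statuses.map Prod.fst).Nodup
instance (statuses : List (String × String)) : Decidable (Pre_count_statuses statuses) := by
  unfold Pre_count_statuses; infer_instance

def pvWitness_count_statuses : (List (String × String)) :=
  [("a", "moving_back"), ("b", "center_flank"), ("c", "x")]

def Spec_count_statuses (statuses : List (String × String)) (out : String × (Int × Int × Int × Int)) : Prop := out = count_statuses_alt statuses
instance (statuses : List (String × String)) (out : String × (Int × Int × Int × Int)) : Decidable (Spec_count_statuses statuses out) := by unfold Spec_count_statuses; infer_instance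

-- ===== CLAIM (what is proved, stated in full; the proofs are below) =====
def Claim_equal_count_statuses : Prop := ∀ (statuses : List (String × String)), Dom_count_statuses statuses → Pre_count_statuses statuses → Spec_count_statuses statuses (count_statuses statuses)

-- ===== LEMMAS AND PROOFS =====

-- under unique keys, membership gives the first-match lookup
theorem pv_get?_of_mem {l : List (String × String)} (h : (l.map Prod.fst).Nodup)
    {k v : String} (hm : (k, v) ∈ l) : (PySem.Dict.mk l).get? k = some v := by
  induction l with
  | nil => cases hm
  | cons p rest ih =>
    simp only [List.map_cons, List.nodup_cons] at h
    rw [PySem.Dict.get?_mk_cons]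
    rcases List.mem_cons.mp hm with h1 | h2
    · cases h1; simp
    · have hne : p.1 ≠ k := by
        intro he
        exact h.1 (List.mem_map.mpr ⟨(k, v), h2, he.symm⟩)
      simp [hne, ih h.2 h2]

-- A's counting loop, reading each item's own value, closed form
theorem pv_loopP (xs : List (String × String)) (s : Int × Int × Int × Int) :
    xs.foldl (fun (s : Int × Int × Int × Int) kv =>
        let v := kv.2
        if v = "moving_back" then (s.1, s.2.1, s.2.2.1, s.2.2.2 + 1)
        else if v = "from_left_flank" then (s.1, s.2.1 + 1, s.2.2.1, s.2.2.2)
        else if v = "from_right_flank" then (s.1, s.2.1, s.2.2.1 + 1, s.2.2.2)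
        else if v = "center_flank" then (s.1 + 1, s.2.1, s.2.2.1, s.2.2.2)
        else s) s
      = (s.1 + ((xs.map Prod.snd).count "center_flank" : Int),
         s.2.1 + ((xs.map Prod.snd).count "from_left_flank" : Int),
         s.2.2.1 + ((xs.map Prod.snd).count "from_right_flank" : Int),
         s.2.2.2 + ((xs.map Prod.snd).count "moving_back" : Int)) := by
  induction xs generalizing s with
  | nil => simp
  | cons x xs ih =>
    simp only [List.foldl_cons, List.map_cons, List.count_cons, ih]
    by_cases h1 : x.2 = "moving_back" <;> by_cases h2 : x.2 = "from_left_flank" <;>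
      by_cases h3 : x.2 = "from_right_flank" <;> by_cases h4 : x.2 = "center_flank" <;>
      simp_all <;> ring_nf

-- ===== VERDICT (by name: the statement is the Claim_ definition above) =====
theorem count_statuses_spec : Claim_equal_count_statuses := by
  intro statuses _ hpre
  unfold Spec_count_statuses count_statuses count_statuses_alt
  have hA : statuses.foldl (fun (s : Int × Int × Int × Int) kv =>
        let v := ((PySem.Dict.mk statuses).get? kv.1).getD ""
        if v = "moving_back" then (s.1, s.2.1, s.2.2.1, s.2.2.2 + 1)
        else if v = "from_left_flank" then (s.1, s.2.1 + 1, s.2.2.1, s.2.2.2)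
        else if v = "from_right_flank" then (s.1, s.2.1, s.2.2.1 + 1, s.2.2.2)
        else if v = "center_flank" then (s.1 + 1, s.2.1, s.2.2.1, s.2.2.2)
        else s) (0, 0, 0, 0)
      = (((statuses.map Prod.snd).count "center_flank" : Int),
         ((statuses.map Prod.snd).count "from_left_flank" : Int),
         ((statuses.map Prod.snd).count "from_right_flank" : Int),
         ((statuses.map Prod.snd).count "moving_back" : Int)) := by
    have hcg : statuses.foldl (fun (s : Int × Int × Int × Int) kv =>
          let v := ((PySem.Dict.mk statuses).get? kv.1).getD ""
          if v = "moving_back" then (s.1, s.2.1, s.2.2.1, s.2.2.2 + 1)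
          else if v = "from_left_flank" then (s.1, s.2.1 + 1, s.2.2.1, s.2.2.2)
          else if v = "from_right_flank" then (s.1, s.2.1, s.2.2.1 + 1, s.2.2.2)
          else if v = "center_flank" then (s.1 + 1, s.2.1, s.2.2.1, s.2.2.2)
          else s) (0, 0, 0, 0)
        = statuses.foldl (fun (s : Int × Int × Int × Int) kv =>
          let v := kv.2
          if v = "moving_back" then (s.1, s.2.1, s.2.2.1, s.2.2.2 + 1)
          else if v = "from_left_flank" then (s.1, s.2.1 + 1, s.2.2.1, s.2.2.2)
          else if v = "from_right_flank" then (s.1, s.2.1, s.2.2.1 + 1, s.2.2.2)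
          else if v = "center_flank" then (s.1 + 1, s.2.1, s.2.2.1, s.2.2.2)
          else s) (0, 0, 0, 0) := by
      apply PySem.List.foldl_congr_mem
      intro s kv hmem
      have : (PySem.Dict.mk statuses).get? kv.1 = some kv.2 :=
        pv_get?_of_mem hpre (by exact hmem)
      simp [this]
    rw [hcg, pv_loopP]
    simp
  by_cases hlen : statuses.length ≠ 0
  · simp only [hA, if_pos hlen, PySem.List.count_eq]
  · have : statuses = [] := List.eq_nil_of_length_eq_zero (by omega)
    subst this
    simp [PySem.List.count]
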